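-- pv_equiv track=rewrite | github.com/0z4ck/zeta_zero | utils/evaluation.py | getokomadai
-- ===== SOURCE A (Python) =====
-- def getokomadai(board,mykomadai):
--     klist = ["p"]*18+["l"]*4+["n"]*4+["s"]*4+["g"]*4+["k","K"]+["r"]*2+["b"]*2
--     for bline in board:
--         for sq in bline:
--           if sq!="":
--             klist.remove(sq[-1])
--     for p in mykomadai:
--         klist.remove(p)
--
--     return klist
-- ===== SOURCE B (Python) =====
-- # Count pieces once into a dict, then rebuild the remainder from the canonical
-- # full-count table in one pass (no repeated list.remove scans); illegal boards
-- # (unknown piece letter / more than the full count) raise ValueError as in A.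
--
-- _FULL = [("p", 18), ("l", 4), ("n", 4), ("s", 4), ("g", 4),
--          ("k", 1), ("K", 1), ("r", 2), ("b", 2)]
--
--
-- def getokomadai(board, mykomadai):
--     seen = {}
--     for bline in board:
--         for sq in bline:
--             if sq != "":
--                 k = sq[-1]
--                 seen[k] = seen.get(k, 0) + 1
--     for p in mykomadai:
--         seen[p] = seen.get(p, 0) + 1
--     for k in seen:
--         if k not in ("p", "l", "n", "s", "g", "k", "K", "r", "b"):
--             raise ValueError("%s is not a piece" % k)
--     out = []
--     for t, full in _FULL:
--         n = seen.get(t, 0)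
--         if n > full:
--             raise ValueError("too many %s" % t)
--         out.extend([t] * (full - n))
--     return out
-- ===== Notes on version B (the rewrite author's own statement) =====
-- stated objective: alternative
-- what changed: Instead of 38 sequential list.remove scans over a mutable piece list, B counts all seen pieces into a dict in one pass, validates them against the canonical full-count table, and rebuilds the remainder directly from the table.
import Mathlib
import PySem

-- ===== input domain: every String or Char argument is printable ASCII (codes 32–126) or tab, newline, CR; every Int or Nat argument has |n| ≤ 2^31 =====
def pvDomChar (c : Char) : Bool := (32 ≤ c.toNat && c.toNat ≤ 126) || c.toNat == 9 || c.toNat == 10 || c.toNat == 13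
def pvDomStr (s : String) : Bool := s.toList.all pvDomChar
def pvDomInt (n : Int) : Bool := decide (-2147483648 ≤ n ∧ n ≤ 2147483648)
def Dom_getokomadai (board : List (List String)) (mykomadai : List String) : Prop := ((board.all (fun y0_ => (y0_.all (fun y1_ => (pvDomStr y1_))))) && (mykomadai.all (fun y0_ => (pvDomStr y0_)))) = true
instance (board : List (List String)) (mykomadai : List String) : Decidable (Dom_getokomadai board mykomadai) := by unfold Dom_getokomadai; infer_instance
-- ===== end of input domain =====

-- B counts the pieces once into a dict and rebuilds the remainder from the canonical
-- full-count table in one pass, instead of A's repeated list.remove scans (objective: alternative).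

-- ===== PORT A =====
-- A's sequential-removal state: None once a remove has failed (Python: ValueError raised).
def pvRemTok (st : Option (List String)) (v : String) : Option (List String) :=
  st.bind (fun l => PySem.List.remove? l v)

def pvKlist : List String :=
  List.replicate 18 "p" ++ List.replicate 4 "l" ++ List.replicate 4 "n" ++
  List.replicate 4 "s" ++ List.replicate 4 "g" ++ ["k", "K"] ++
  List.replicate 2 "r" ++ List.replicate 2 "b"

def getokomadai (board : List (List String)) (mykomadai : List String) : List String :=
  let st := board.foldl (fun st bline =>
    bline.foldl (fun st sq =>
      if sq ≠ "" then
        match PySem.Str.pyGet? sq (-1) with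
        | some c => pvRemTok st (String.ofList [c])
        | none => none
      else st) st) (some pvKlist)
  let st := mykomadai.foldl pvRemTok st
  st.getD []   -- total form; under Pre_ every remove succeeds and st is `some`

-- ===== PORT B =====
def pvFullTable : List (String × Int) :=
  [("p", 18), ("l", 4), ("n", 4), ("s", 4), ("g", 4), ("k", 1), ("K", 1), ("r", 2), ("b", 2)]

-- seen[k] = seen.get(k, 0) + 1
def pvSeenStep (d : PySem.Dict String Int) (t : String) : PySem.Dict String Int :=
  d.insert t (d.getD t 0 + 1)

-- the tuple ("p", "l", "n", "s", "g", "k", "K", "r", "b") of legal piece letters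
def pvPieceLetters : List String := ["p", "l", "n", "s", "g", "k", "K", "r", "b"]

def getokomadai_alt (board : List (List String)) (mykomadai : List String) : List String :=
  let seen := board.foldl (fun d bline =>
    bline.foldl (fun d sq =>
      if sq ≠ "" then
        match PySem.Str.pyGet? sq (-1) with
        | some c => pvSeenStep d (String.ofList [c])
        | none => d
      else d) d) PySem.Dict.empty
  let seen := mykomadai.foldl pvSeenStep seen
  -- `for k in seen: if k not in (...): raise ValueError`; the raise is modelled as [] (outside Pre_)
  if seen.keys.all (fun k => pvPieceLetters.contains k) then
    -- `if n > full: raise ValueError` is modelled as none (outside Pre_)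
    (pvFullTable.foldl (fun st e => st.bind (fun out =>
        let n := seen.getD e.1 0
        if e.2 < n then none else some (out ++ List.replicate (e.2 - n).toNat e.1)))
      (some [])).getD []
  else []

-- ===== PRECONDITION & SPEC =====
-- the last character of each non-empty square, then the hand pieces (the strings A removes)
def pvTok (sq : String) : Option String :=
  if sq = "" then none else (PySem.Str.pyGet? sq (-1)).map (fun c => String.ofList [c])

def pvToks (board : List (List String)) (mykomadai : List String) : List String :=
  board.flatMap (fun bl => bl.filterMap pvTok) ++ mykomadai

def pvTable : List (String × Nat) :=
  [("p", 18), ("l", 4), ("n", 4), ("s", 4), ("g", 4), ("k", 1), ("K", 1), ("r", 2), ("b", 2)]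

-- Pre_ excludes exactly the inputs where A's list.remove raises ValueError: a removed
-- string that is not a piece letter, or more pieces of a type than the full count.
def Pre_getokomadai (board : List (List String)) (mykomadai : List String) : Prop :=
  ((pvToks board mykomadai).all (fun t => (pvTable.map Prod.fst).contains t)
    && pvTable.all (fun e => decide ((pvToks board mykomadai).count e.1 ≤ e.2))) = true

instance (board : List (List String)) (mykomadai : List String) : Decidable (Pre_getokomadai board mykomadai) := by
  unfold Pre_getokomadai; infer_instance

def pvWitness_getokomadai : List (List String) × List String := ([["p", "", "+r"], ["K"]], ["g", "p"])

def Spec_getokomadai (board : List (List String)) (mykomadai : List String) (out : List String) : Prop := out = getokomadai_alt board mykomadai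
instance (board : List (List String)) (mykomadai : List String) (out : List String) : Decidable (Spec_getokomadai board mykomadai out) := by unfold Spec_getokomadai; infer_instance

-- ===== CLAIM (what is proved, stated in full; the proofs are below) =====
def Claim_equal_getokomadai : Prop := ∀ (board : List (List String)) (mykomadai : List String), Dom_getokomadai board mykomadai → Pre_getokomadai board mykomadai → Spec_getokomadai board mykomadai (getokomadai board mykomadai)

-- ===== LEMMAS AND PROOFS =====

-- full count per letter
def pvFullF : String → Nat := fun t =>
  if t = "p" then 18 else if t = "l" then 4 else if t = "n" then 4 else
  if t = "s" then 4 else if t = "g" then 4 else if t = "k" then 1 else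
  if t = "K" then 1 else if t = "r" then 2 else if t = "b" then 2 else 0

lemma pvTok_of_ne (sq : String) (h : sq ≠ "") :
    ∃ c, PySem.Str.pyGet? sq (-1) = some c ∧ pvTok sq = some (String.ofList [c]) := by
  have hne : sq.toList ≠ [] := by simpa [String.toList_eq_nil_iff] using h
  obtain ⟨ys, c, hcat⟩ := (List.eq_nil_or_concat sq.toList).resolve_left hne
  have hget : PySem.Str.pyGet? sq (-1) = some c := by
    rw [show PySem.Str.pyGet? sq (-1) = PySem.List.pyGet? sq.toList (-1) from rfl, hcat,
      List.concat_eq_append, PySem.List.pyGet?_neg_one_append_singleton]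
  exact ⟨c, hget, by rw [pvTok, if_neg h, hget]; rfl⟩

lemma foldl_tok_inner {β : Type} (g : β → String → β) (step : β → String → β)
    (hstep : ∀ st sq, step st sq = (match pvTok sq with | some t => g st t | none => st))
    (bl : List String) (st : β) :
    bl.foldl step st = (bl.filterMap pvTok).foldl g st := by
  induction bl generalizing st with
  | nil => rfl
  | cons sq bl ih =>
    rw [List.foldl_cons, List.filterMap_cons, hstep]
    cases htok : pvTok sq with
    | none => simp only [ih]
    | some t => simp only [List.foldl_cons, ih]

lemma foldl_tok_board {β : Type} (g : β → String → β) (step : β → String → β)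
    (hstep : ∀ st sq, step st sq = (match pvTok sq with | some t => g st t | none => st))
    (board : List (List String)) (init : β) :
    board.foldl (fun st bl => bl.foldl step st) init
      = (board.flatMap (fun bl => bl.filterMap pvTok)).foldl g init := by
  induction board generalizing init with
  | nil => rfl
  | cons bl board ih =>
    rw [List.foldl_cons, List.flatMap_cons, List.foldl_append, ih,
      foldl_tok_inner g step hstep]

lemma remove?_append_not_mem (l1 l2 : List String) (x : String) (hx : x ∉ l1) :
    PySem.List.remove? (l1 ++ l2) x = (PySem.List.remove? l2 x).map (l1 ++ ·) := by
  induction l1 with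
  | nil => simp
  | cons a l1 ih =>
    have ha : a ≠ x := fun h => hx (by rw [h]; exact List.mem_cons_self)
    rw [List.cons_append, PySem.List.remove?_cons_of_ne _ ha,
      ih (fun h => hx (List.mem_cons_of_mem _ h)), Option.map_map]
    rfl

lemma not_mem_replicate_of_ne (n : Nat) (t x : String) (h : t ≠ x) :
    x ∉ List.replicate n t := by
  intro hm
  exact h ((List.eq_of_mem_replicate hm).symm)

lemma remove_bld (ks : List String) (hnd : ks.Nodup) (f : String → Nat) (x : String)
    (hx : x ∈ ks) (hf : 0 < f x) :
    PySem.List.remove? (ks.flatMap (fun t => List.replicate (f t) t)) x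
      = some (ks.flatMap (fun t => List.replicate (if t = x then f t - 1 else f t) t)) := by
  induction ks with
  | nil => cases hx
  | cons a ks ih =>
    rw [List.flatMap_cons, List.flatMap_cons]
    rcases List.nodup_cons.mp hnd with ⟨ha, hnd'⟩
    by_cases hax : a = x
    · subst hax
      have hrep : List.replicate (f a) a = a :: List.replicate (f a - 1) a := by
        rw [← List.replicate_succ]
        congr 1
        omega
      rw [hrep, List.cons_append, PySem.List.remove?_cons_self, if_pos rfl]
      have : ks.flatMap (fun t => List.replicate (if t = a then f t - 1 else f t) t)
          = ks.flatMap (fun t => List.replicate (f t) t) := by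
        apply List.flatMap_congr
        intro t ht
        rw [if_neg (fun h : t = a => ha (h ▸ ht))]
      rw [this]
    · have hxk : x ∈ ks := (List.mem_cons.mp hx).resolve_left (fun h => hax h.symm)
      rw [remove?_append_not_mem _ _ _ (not_mem_replicate_of_ne _ _ _ hax),
        ih hnd' hxk, if_neg hax]
      rfl

lemma fold_remove (toks : List String) (ks : List String) (hnd : ks.Nodup) (f : String → Nat)
    (hmem : ∀ t ∈ toks, t ∈ ks) (hcnt : ∀ t, toks.count t ≤ f t) :
    toks.foldl pvRemTok (some (ks.flatMap (fun t => List.replicate (f t) t)))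
      = some (ks.flatMap (fun t => List.replicate (f t - toks.count t) t)) := by
  induction toks generalizing f with
  | nil =>
    simp only [List.foldl_nil, List.count_nil, Nat.sub_zero]
  | cons x toks ih =>
    have hx : x ∈ ks := hmem x List.mem_cons_self
    have hfx : 0 < f x := by
      have h := hcnt x
      simp only [List.count_cons, BEq.rfl, if_true] at h
      omega
    rw [List.foldl_cons,
      show pvRemTok (some (ks.flatMap (fun t => List.replicate (f t) t))) x
        = PySem.List.remove? (ks.flatMap (fun t => List.replicate (f t) t)) x from rfl,
      remove_bld ks hnd f x hx hfx,
      ih (fun t => if t = x then f t - 1 else f t)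
        (fun t ht => hmem t (List.mem_cons_of_mem _ ht))
        (by
          intro t
          show List.count t toks ≤ if t = x then f t - 1 else f t
          have h := hcnt t
          simp only [List.count_cons, beq_iff_eq] at h
          by_cases htx : t = x
          · rw [if_pos htx.symm] at h
            rw [if_pos htx]
            omega
          · rw [if_neg (Ne.symm htx)] at h
            rw [if_neg htx]
            omega)]
    congr 1
    apply List.flatMap_congr
    intro t ht
    have h1 := hcnt t
    simp only [List.count_cons, beq_iff_eq] at h1 ⊢
    by_cases htx : t = x
    · rw [if_pos htx.symm] at h1
      rw [if_pos htx, if_pos htx.symm]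
      congr 1
      omega
    · rw [if_neg (Ne.symm htx)] at h1
      rw [if_neg htx, if_neg (Ne.symm htx)]
      congr 1

lemma klist_eq_bld : pvKlist = pvPieceLetters.flatMap (fun t => List.replicate (pvFullF t) t) := by
  decide

lemma A_eq_fold (board : List (List String)) (mykomadai : List String) :
    getokomadai board mykomadai
      = ((pvToks board mykomadai).foldl pvRemTok (some pvKlist)).getD [] := by
  rw [getokomadai, pvToks, List.foldl_append]
  congr 2
  apply foldl_tok_board
  intro st sq
  by_cases h : sq = ""
  · subst h
    simp [pvTok]
  · obtain ⟨c, hc, htok⟩ := pvTok_of_ne sq h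
    rw [if_pos h, hc, htok]

lemma opt_fold (l : List (String × Int)) (d : PySem.Dict String Int) (acc : List String)
    (h : ∀ e ∈ l, ¬ e.2 < d.getD e.1 0) :
    l.foldl (fun st e => st.bind (fun out =>
        let n := d.getD e.1 0
        if e.2 < n then none else some (out ++ List.replicate (e.2 - n).toNat e.1))) (some acc)
      = some (acc ++ l.flatMap (fun e => List.replicate ((e.2 - d.getD e.1 0).toNat) e.1)) := by
  induction l generalizing acc with
  | nil => simp
  | cons e l ih =>
    rw [List.foldl_cons]
    simp only [Option.bind_some, if_neg (h e List.mem_cons_self)]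
    rw [ih _ (fun e' he' => h e' (List.mem_cons_of_mem _ he')), List.flatMap_cons,
      List.append_assoc]

lemma B_eq_count (board : List (List String)) (mykomadai : List String)
    (hmem' : ∀ t ∈ pvToks board mykomadai, t ∈ pvPieceLetters)
    (hcnt' : ∀ t, (pvToks board mykomadai).count t ≤ pvFullF t) :
    getokomadai_alt board mykomadai
      = pvFullTable.flatMap
          (fun e => List.replicate ((e.2 - ((pvToks board mykomadai).count e.1 : Int)).toNat) e.1) := by
  rw [getokomadai_alt]
  have hseen : (board.foldl (fun d bline =>
      bline.foldl (fun d sq =>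
        if sq ≠ "" then
          match PySem.Str.pyGet? sq (-1) with
          | some c => pvSeenStep d (String.ofList [c])
          | none => d
        else d) d) PySem.Dict.empty)
      = (board.flatMap (fun bl => bl.filterMap pvTok)).foldl pvSeenStep PySem.Dict.empty := by
    apply foldl_tok_board
    intro st sq
    by_cases h : sq = ""
    · subst h
      simp [pvTok]
    · obtain ⟨c, hc, htok⟩ := pvTok_of_ne sq h
      rw [if_pos h, hc, htok]
  rw [hseen]
  rw [show (mykomadai.foldl pvSeenStep
      ((board.flatMap (fun bl => bl.filterMap pvTok)).foldl pvSeenStep PySem.Dict.empty))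
    = (pvToks board mykomadai).foldl pvSeenStep PySem.Dict.empty by
      rw [pvToks, List.foldl_append]]
  have hcounter : (pvToks board mykomadai).foldl pvSeenStep PySem.Dict.empty
      = PySem.Dict.counter (pvToks board mykomadai) := by
    rw [show pvSeenStep = fun d x => d.insert x (d.getD x 0 + 1) from rfl]
    exact PySem.Dict.foldl_insert_getD_add_one_eq_counter _
  have hget : ∀ v : String,
      ((pvToks board mykomadai).foldl pvSeenStep PySem.Dict.empty).getD v 0
        = ((pvToks board mykomadai).count v : Int) := by
    intro v
    rw [hcounter, PySem.Dict.getD_counter]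
  have hkeys : ((pvToks board mykomadai).foldl pvSeenStep PySem.Dict.empty).keys.all
      (fun k => pvPieceLetters.contains k) = true := by
    rw [hcounter, PySem.Dict.keys_counter, List.all_eq_true]
    intro k hk
    exact List.contains_iff_mem.mpr (hmem' k ((PySem.Set.mem_ofList _ _).mp hk))
  rw [if_pos hkeys]
  have hbound : ∀ e ∈ pvFullTable,
      ¬ e.2 < ((pvToks board mykomadai).foldl pvSeenStep PySem.Dict.empty).getD e.1 0 := by
    intro e he
    rw [hget]
    have hp : List.count "p" (pvToks board mykomadai) ≤ 18 := by
      have := hcnt' "p"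
      rwa [show pvFullF "p" = 18 from by decide] at this
    have hl : List.count "l" (pvToks board mykomadai) ≤ 4 := by
      have := hcnt' "l"
      rwa [show pvFullF "l" = 4 from by decide] at this
    have hn : List.count "n" (pvToks board mykomadai) ≤ 4 := by
      have := hcnt' "n"
      rwa [show pvFullF "n" = 4 from by decide] at this
    have hs : List.count "s" (pvToks board mykomadai) ≤ 4 := by
      have := hcnt' "s"
      rwa [show pvFullF "s" = 4 from by decide] at this
    have hg : List.count "g" (pvToks board mykomadai) ≤ 4 := by
      have := hcnt' "g"
      rwa [show pvFullF "g" = 4 from by decide] at this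
    have hk : List.count "k" (pvToks board mykomadai) ≤ 1 := by
      have := hcnt' "k"
      rwa [show pvFullF "k" = 1 from by decide] at this
    have hK : List.count "K" (pvToks board mykomadai) ≤ 1 := by
      have := hcnt' "K"
      rwa [show pvFullF "K" = 1 from by decide] at this
    have hr : List.count "r" (pvToks board mykomadai) ≤ 2 := by
      have := hcnt' "r"
      rwa [show pvFullF "r" = 2 from by decide] at this
    have hb : List.count "b" (pvToks board mykomadai) ≤ 2 := by
      have := hcnt' "b"
      rwa [show pvFullF "b" = 2 from by decide] at this
    fin_cases he <;> simp <;> omega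
  rw [opt_fold _ _ _ hbound, Option.getD_some, List.nil_append]
  apply List.flatMap_congr
  intro e _
  rw [hget]

-- ===== VERDICT (by name: the statement is the Claim_ definition above) =====
theorem getokomadai_spec : Claim_equal_getokomadai := by
  intro board mykomadai _ hpre
  unfold Spec_getokomadai
  unfold Pre_getokomadai at hpre
  rw [Bool.and_eq_true, List.all_eq_true, List.all_eq_true] at hpre
  obtain ⟨hmem, hcnt⟩ := hpre
  set toks := pvToks board mykomadai with htoks
  have hmem' : ∀ t ∈ toks, t ∈ pvPieceLetters := by
    intro t ht
    have h := hmem t ht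
    rw [show pvTable.map Prod.fst = pvPieceLetters from rfl] at h
    exact List.contains_iff_mem.mp h
  have hcnt' : ∀ t, toks.count t ≤ pvFullF t := by
    intro t
    by_cases ht : t ∈ toks
    · have hk := hmem' t ht
      have h18 := of_decide_eq_true (hcnt ("p", 18) (by decide))
      have h4l := of_decide_eq_true (hcnt ("l", 4) (by decide))
      have h4n := of_decide_eq_true (hcnt ("n", 4) (by decide))
      have h4s := of_decide_eq_true (hcnt ("s", 4) (by decide))
      have h4g := of_decide_eq_true (hcnt ("g", 4) (by decide))
      have h1k := of_decide_eq_true (hcnt ("k", 1) (by decide))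
      have h1K := of_decide_eq_true (hcnt ("K", 1) (by decide))
      have h2r := of_decide_eq_true (hcnt ("r", 2) (by decide))
      have h2b := of_decide_eq_true (hcnt ("b", 2) (by decide))
      simp only [pvPieceLetters, List.mem_cons, List.not_mem_nil, or_false] at hk
      rcases hk with rfl | rfl | rfl | rfl | rfl | rfl | rfl | rfl | rfl <;>
        simpa [pvFullF] using ‹_›
    · rw [List.count_eq_zero_of_not_mem ht]
      exact Nat.zero_le _
  rw [A_eq_fold, B_eq_count board mykomadai hmem' hcnt', ← htoks, klist_eq_bld,
    fold_remove toks pvPieceLetters (by decide) pvFullF hmem' hcnt', Option.getD_some]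
  have rep_eq : ∀ (k : Int) (n : Nat) (t : String), k = (n : Int) → toks.count t ≤ n →
      List.replicate ((k - (toks.count t : Int)).toNat) t
        = List.replicate (n - toks.count t) t := by
    intro k n t hk h
    subst hk
    congr 1
    omega
  simp only [pvFullTable, pvPieceLetters, List.flatMap_cons, List.flatMap_nil, List.append_nil]
  rw [rep_eq 18 18 "p" (by norm_num) (hcnt' "p"), rep_eq 4 4 "l" (by norm_num) (hcnt' "l"),
    rep_eq 4 4 "n" (by norm_num) (hcnt' "n"), rep_eq 4 4 "s" (by norm_num) (hcnt' "s"),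
    rep_eq 4 4 "g" (by norm_num) (hcnt' "g"), rep_eq 1 1 "k" (by norm_num) (hcnt' "k"),
    rep_eq 1 1 "K" (by norm_num) (hcnt' "K"), rep_eq 2 2 "r" (by norm_num) (hcnt' "r"),
    rep_eq 2 2 "b" (by norm_num) (hcnt' "b")]
  simp [pvFullF]
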